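-- pv_equiv track=rewrite | github.com/DmitryChitalov/python_algos_gb | lesson_05/task_2_collections.py | from_hex
-- ===== SOURCE A (Python) =====
-- from collections import defaultdict
--
-- def from_hex(number):
--     """Переводит шестнадцатеричное число в виде списка в десятичное число"""
--     num = defaultdict(list)
--     number = number[::-1]
--     for idx in range(len(number)):
--         num[idx].append(number[idx])
--     result = [int(elem, 16) * 16**key
--               for key in num
--               for elem in num[key]]
--     return sum(result)
-- ===== SOURCE B (Python) =====
-- def from_hex(number):
--     """Переводит шестнадцатеричное число в виде списка в десятичное число"""
--     result = 0
--     for digit in number: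
--         result = result * 16 + int(digit, 16)
--     return result
-- ===== Notes on version B (the rewrite author's own statement) =====
-- stated objective: faster
-- what changed: Replaces the reverse + defaultdict grouping + 16**k weighted comprehension with a single left-to-right Horner fold (result = result*16 + digit), maintaining an accumulator instead of a position-keyed dict and per-position power terms.
import Mathlib
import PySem

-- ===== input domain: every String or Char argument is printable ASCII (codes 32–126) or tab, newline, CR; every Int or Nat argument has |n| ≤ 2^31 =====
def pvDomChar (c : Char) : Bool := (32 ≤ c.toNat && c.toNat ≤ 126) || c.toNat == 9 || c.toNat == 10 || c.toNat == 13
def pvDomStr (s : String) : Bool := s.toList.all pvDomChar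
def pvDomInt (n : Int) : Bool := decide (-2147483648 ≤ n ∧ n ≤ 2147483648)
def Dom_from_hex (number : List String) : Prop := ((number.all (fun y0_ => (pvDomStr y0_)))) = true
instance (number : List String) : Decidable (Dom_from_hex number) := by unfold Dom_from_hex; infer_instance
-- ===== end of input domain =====

-- B changes the algorithm: a single Horner fold instead of reverse + defaultdict grouping + 16**k weighted sum (idiomatic).

-- ===== PORT A =====
-- num[idx].append(x) on a defaultdict(list) is Dict.modify idx [] (· ++ [x]);
-- 16**key has key ≥ 0 here (it comes from range(len)), so 16 ^ key.toNat is exact;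
-- int(elem, 16) is PySem.Int.ofStrBase?; Pre_ excludes the none (ValueError) case, getD 0 is never used.
def from_hex (number : List String) : Int :=
  let rev := (PySem.List.slice? number none none (-1)).getD []
  let num : PySem.Dict Int (List String) :=
    (PySem.List.pyRange 0 rev.length 1).foldl
      (fun d idx => d.modify idx [] (fun l => l ++ [PySem.List.pyGetD rev idx ""])) PySem.Dict.empty
  let result : List Int :=
    (num.keys.map (fun key =>
      (num.getD key []).map (fun elem => (PySem.Int.ofStrBase? elem 16).getD 0 * 16 ^ key.toNat))).flatten
  result.sum

-- ===== PORT B =====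
def from_hex_alt (number : List String) : Int :=
  number.foldl (fun result digit => result * 16 + (PySem.Int.ofStrBase? digit 16).getD 0) 0

-- ===== PRECONDITION & SPEC =====
-- Exactly the inputs where Python's int(elem, 16) succeeds on every element (else A raises ValueError).
def Pre_from_hex (number : List String) : Prop :=
  (number.all (fun s => (PySem.Int.ofStrBase? s 16).isSome)) = true
instance (number : List String) : Decidable (Pre_from_hex number) := by unfold Pre_from_hex; infer_instance
def pvWitness_from_hex : List String := ["1", "f", " A ", "-2"]
def Spec_from_hex (number : List String) (out : Int) : Prop := out = from_hex_alt number
instance (number : List String) (out : Int) : Decidable (Spec_from_hex number out) := by unfold Spec_from_hex; infer_instance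

-- ===== CLAIM (what is proved, stated in full; the proofs are below) =====
def Claim_equal_from_hex : Prop := ∀ (number : List String), Dom_from_hex number → Pre_from_hex number → Spec_from_hex number (from_hex number)

-- ===== LEMMAS AND PROOFS =====

-- the digit value both ports use
def pvVal (s : String) : Int := (PySem.Int.ofStrBase? s 16).getD 0

-- A's grouping loop over distinct indices: each key holds exactly its singleton
lemma getD_loop (g : Int → String) :
    ∀ (l : List Int), l.Nodup → ∀ (d : PySem.Dict Int (List String)) (j : Int),
    (l.foldl (fun d i => d.modify i [] (fun t => t ++ [g i])) d).getD j []
      = if j ∈ l then d.getD j [] ++ [g j] else d.getD j [] := by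
  intro l
  induction l with
  | nil => intro _ d j; simp
  | cons x xs ih =>
    intro hl d j
    rw [List.foldl_cons, ih (List.Nodup.of_cons hl) _ j]
    rcases List.nodup_cons.mp hl with ⟨hx, _⟩
    by_cases hj : j ∈ xs
    · have : j ≠ x := fun h => hx (h ▸ hj)
      simp [hj, this, PySem.Dict.getD_modify]
    · by_cases hjx : j = x
      · subst hjx; simp [hj]
      · simp [hj, hjx, PySem.Dict.getD_modify]

-- Horner fold = positional sum over the reversed list
lemma horner_sum (ys : List String) :
    ((List.range ys.length).map (fun k => pvVal (ys.getD k "") * 16 ^ k)).sum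
      = ys.reverse.foldl (fun r s => r * 16 + pvVal s) 0 := by
  induction ys with
  | nil => simp
  | cons y t ih =>
    rw [List.reverse_cons, List.foldl_append]
    simp only [List.length_cons, List.range_succ_eq_map, List.map_cons, List.map_map,
      List.sum_cons, List.foldl_cons]
    have : ((List.range t.length).map
        ((fun k => pvVal ((y :: t).getD k "") * 16 ^ k) ∘ (· + 1))).sum
        = 16 * ((List.range t.length).map (fun k => pvVal (t.getD k "") * 16 ^ k)).sum := by
      rw [← List.sum_map_mul_left]
      congr 1
      refine List.map_congr_left (fun k _ => ?_)
      simp [Function.comp, pow_succ]; ring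
    rw [this, ih]
    simp
    ring

-- ===== VERDICT (by name: the statement is the Claim_ definition above) =====
theorem from_hex_spec : Claim_equal_from_hex := by
  intro number _ _
  show from_hex number = from_hex_alt number
  unfold from_hex from_hex_alt
  rw [PySem.List.slice?_none_none_neg_one]
  simp only [Option.getD_some]
  have hkeys :
      ((PySem.List.pyRange 0 (number.reverse.length : Int) 1).foldl
        (fun d idx => d.modify idx [] (fun l => l ++ [PySem.List.pyGetD number.reverse idx ""]))
        PySem.Dict.empty).keys = PySem.List.pyRange 0 (number.reverse.length : Int) 1 := by
    rw [PySem.Dict.keys_foldl_modify]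
    simp only [PySem.Dict.keys_empty]
    rw [PySem.Set.update_nil_left]
    exact PySem.Set.ofList_eq_self_of_nodup _ (PySem.List.nodup_pyRange_one 0 _)
  rw [hkeys]
  have hget := getD_loop (fun i => PySem.List.pyGetD number.reverse i "")
    (PySem.List.pyRange 0 (number.reverse.length : Int) 1)
    (PySem.List.nodup_pyRange_one 0 _) PySem.Dict.empty
  calc
    ((PySem.List.pyRange 0 (number.reverse.length : Int) 1).map (fun key =>
        (((PySem.List.pyRange 0 (number.reverse.length : Int) 1).foldl
          (fun d idx => d.modify idx [] (fun l => l ++ [PySem.List.pyGetD number.reverse idx ""]))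
          PySem.Dict.empty).getD key []).map
            (fun elem => (PySem.Int.ofStrBase? elem 16).getD 0 * 16 ^ key.toNat))).flatten.sum
      = ((PySem.List.pyRange 0 (number.reverse.length : Int) 1).map (fun key =>
          [pvVal (PySem.List.pyGetD number.reverse key "") * 16 ^ key.toNat])).flatten.sum := by
        congr 1; congr 1
        refine List.map_congr_left (fun key hk => ?_)
        rw [hget key, if_pos hk]
        simp [pvVal]
    _ = ((List.range number.reverse.length).map
          (fun k => pvVal (number.reverse.getD k "") * 16 ^ k)).sum := by
        rw [PySem.List.pyRange_one, List.sum_flatten]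
        simp only [List.map_map, List.length_reverse, Int.sub_zero, Int.toNat_natCast]
        refine congrArg List.sum (List.map_congr_left (fun k _ => ?_))
        simp [pvVal, List.getD]
    _ = number.foldl (fun r s => r * 16 + pvVal s) 0 := by
        rw [horner_sum, List.reverse_reverse]
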